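-- pv_equiv track=rewrite | github.com/DominikaJastrzebska/Kurs_Python | 05_christmas_tree/love_calculator.py | add_numbers_from_list
-- ===== SOURCE A (Python) =====
-- def add_numbers_from_list(list_without_zero):
--     """
--     Function takes the value - list of numbers and create new list of numbers by adding first and last number
--     and remove it from previous list
--     param: list of numbers
--     return list of numbers
--     """
--     if len(list_without_zero) == 2:
--         return list_without_zero
--     else:
--         next_number_list = []
--         while len(list_without_zero) >= 1:
--             if len(list_without_zero) >= 2:
--                 next_number_list.append(list_without_zero.pop(0) + list_without_zero.pop(-1))
--             else:
--                 next_number_list.append(list_without_zero.pop())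
--         return add_numbers_from_list(next_number_list)
-- ===== SOURCE B (Python) =====
-- def add_numbers_from_list(list_without_zero):
--     """Iterative version: each round pairs the first half with the reversed
--     second half by index (no pops, argument not mutated; return value only)."""
--     lst = list_without_zero
--     while len(lst) > 2:
--         n = len(lst)
--         half = n // 2
--         nxt = [x + y for x, y in zip(lst[:half], reversed(lst[half + n % 2:]))]
--         if n % 2:
--             nxt.append(lst[half])
--         lst = nxt
--     return lst
-- ===== Notes on version B (the rewrite author's own statement) =====
-- stated objective: faster
-- what changed: Replaced A's outer tail recursion and pop(0)/pop(-1) draining loop by a single iterative while-loop whose round is built by index pairing (zip of the first half with the reversed second half), leaving the argument unmutated.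
import Mathlib
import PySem

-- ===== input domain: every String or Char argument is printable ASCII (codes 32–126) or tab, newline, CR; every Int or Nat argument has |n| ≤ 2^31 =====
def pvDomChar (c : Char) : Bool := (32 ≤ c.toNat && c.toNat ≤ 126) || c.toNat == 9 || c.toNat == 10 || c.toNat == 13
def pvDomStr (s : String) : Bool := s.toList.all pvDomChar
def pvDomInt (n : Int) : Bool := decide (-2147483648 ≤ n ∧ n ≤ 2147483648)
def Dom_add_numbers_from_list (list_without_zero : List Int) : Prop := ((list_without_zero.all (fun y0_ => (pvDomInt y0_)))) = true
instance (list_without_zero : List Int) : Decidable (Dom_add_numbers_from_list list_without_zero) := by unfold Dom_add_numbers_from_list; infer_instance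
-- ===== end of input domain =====

-- B replaces A's pop-draining recursion by an iterative index-pairing loop (alternative
-- decomposition; equivalence is about the RETURN value only: A drains the argument list
-- in place when its length exceeds 2, B never mutates it).
-- ===== PORT A =====
-- inner `while len(list_without_zero) >= 1` loop of A, with `next_number_list` as `acc`;
-- the fuel (called with fuel = length) is only a totality guard: each iteration pops >= 1 element
def pyLoopA : Nat → List Int → List Int → List Int
  | 0, _, acc => acc
  | f + 1, l, acc =>
    if 1 ≤ l.length then
      if 2 ≤ l.length then
        match PySem.List.pop? l 0 with
        | some (a, l1) =>
          match PySem.List.pop? l1 (-1) with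
          | some (b, l2) => pyLoopA f l2 (acc ++ [a + b])
          | none => acc  -- unreachable: l1 nonempty
        | none => acc    -- unreachable: l nonempty
      else
        match PySem.List.pop? l (-1) with
        | some (a, l1) => pyLoopA f l1 (acc ++ [a])
        | none => acc    -- unreachable: l nonempty
    else acc

-- A's outer tail recursion, fueled (each call strictly shrinks the list inside Pre_,
-- so fuel = length is always enough there; fuel is only a totality guard)
def aGo : Nat → List Int → List Int
  | 0, l => l
  | f + 1, l => if l.length = 2 then l else aGo f (pyLoopA l.length l [])

def add_numbers_from_list (list_without_zero : List Int) : List Int :=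
  aGo list_without_zero.length list_without_zero

-- ===== PORT B =====
-- one round of Source B's while body: zip the first half with the reversed second half,
-- append the middle element when the length is odd (index half < length there)
def roundB (l : List Int) : List Int :=
  let n := l.length
  let half := n / 2
  (List.zipWith (· + ·) (l.take half) ((l.drop (half + n % 2)).reverse)) ++
    (if n % 2 = 1 then [l.getD half 0] else [])

-- Source B's `while len(lst) > 2` loop, fueled (fuel = length always suffices)
def bGo : Nat → List Int → List Int
  | 0, l => l
  | f + 1, l => if 2 < l.length then bGo f (roundB l) else l

def add_numbers_from_list_alt (list_without_zero : List Int) : List Int :=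
  bGo list_without_zero.length list_without_zero

-- ===== PRECONDITION & SPEC =====
-- Pre_ excludes exactly the lists of length 0 or 1, on which Python A recurses forever
-- on an unchanging list and dies with RecursionError (no value is returned).
def Pre_add_numbers_from_list (list_without_zero : List Int) : Prop :=
  2 ≤ list_without_zero.length
instance (list_without_zero : List Int) : Decidable (Pre_add_numbers_from_list list_without_zero) := by
  unfold Pre_add_numbers_from_list; infer_instance
def pvWitness_add_numbers_from_list : List Int := [1, 2, 3]

def Spec_add_numbers_from_list (list_without_zero : List Int) (out : List Int) : Prop := out = add_numbers_from_list_alt list_without_zero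
instance (list_without_zero : List Int) (out : List Int) : Decidable (Spec_add_numbers_from_list list_without_zero out) := by unfold Spec_add_numbers_from_list; infer_instance

-- ===== CLAIM (what is proved, stated in full; the proofs are below) =====
def Claim_equal_add_numbers_from_list : Prop := ∀ (list_without_zero : List Int), Dom_add_numbers_from_list list_without_zero → Pre_add_numbers_from_list list_without_zero → Spec_add_numbers_from_list list_without_zero (add_numbers_from_list list_without_zero)
-- ===== LEMMAS AND PROOFS =====

theorem roundB_cons (a b : Int) (m : List Int) :
    roundB (a :: m ++ [b]) = (a + b) :: roundB m := by
  simp only [roundB]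
  have hlen : (a :: m ++ [b]).length = m.length + 2 := by simp
  rw [hlen]
  set k := m.length with hk
  have h1 : (k + 2) / 2 = k / 2 + 1 := by omega
  have h2 : (k + 2) % 2 = k % 2 := by omega
  rw [h1, h2]
  have htake : (a :: m ++ [b]).take (k / 2 + 1) = a :: m.take (k / 2) := by
    rw [List.cons_append, List.take_succ_cons, List.take_append_of_le_length (by omega)]
  have hdrop : (a :: m ++ [b]).drop (k / 2 + 1 + k % 2) = m.drop (k / 2 + k % 2) ++ [b] := by
    rw [List.cons_append]
    have : k / 2 + 1 + k % 2 = (k / 2 + k % 2) + 1 := by omega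
    rw [this, List.drop_succ_cons, List.drop_append_of_le_length (by omega)]
  rw [htake, hdrop, List.reverse_append]
  simp only [List.reverse_singleton, List.singleton_append, List.zipWith_cons_cons]
  by_cases ho : k % 2 = 1
  · simp only [ho]
    have : (a :: m ++ [b]).getD (k / 2 + 1) 0 = m.getD (k / 2) 0 := by
      rw [List.cons_append, List.getD_cons_succ, List.getD_append _ _ _ _ (by omega)]
    rw [this]
    simp
  · simp [ho]

theorem roundB_length (l : List Int) :
    (roundB l).length = (l.length + 1) / 2 := by
  simp only [roundB, List.length_append, List.length_zipWith, List.length_take,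
    List.length_reverse, List.length_drop]
  by_cases ho : l.length % 2 = 1 <;> simp [ho] <;> omega

theorem loopA_eq : ∀ (f : Nat) (l : List Int), l.length ≤ f →
    ∀ acc, pyLoopA f l acc = acc ++ roundB l := by
  intro f
  induction f with
  | zero =>
    intro l hl acc
    have : l = [] := List.eq_nil_of_length_eq_zero (by omega)
    subst this; simp [pyLoopA, roundB]
  | succ f ih =>
    intro l hl acc
    match l with
    | [] => simp [pyLoopA, roundB]
    | [x] =>
      have hp : PySem.List.pop? [x] (-1) = some (x, ([] : List Int)) :=
        PySem.List.pop?_last [] x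
      simp only [pyLoopA, List.length_singleton, le_refl, if_true, hp]
      rw [if_neg (by omega)]
      rw [ih [] (by simp) (acc ++ [x])]
      simp [roundB]
    | a :: b :: t =>
      obtain ⟨m, c, hmc⟩ : ∃ m c, b :: t = m ++ [c] := by
        rcases (b :: t).eq_nil_or_concat with h | ⟨m, c, h⟩
        · simp at h
        · exact ⟨m, c, by simpa [List.concat_eq_append] using h⟩
      rw [hmc]
      have h0 : PySem.List.pop? (a :: (m ++ [c])) 0 = some (a, m ++ [c]) :=
        PySem.List.pop?_zero_cons a (m ++ [c])
      have h1 : PySem.List.pop? (m ++ [c]) (-1) = some (c, m) :=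
        PySem.List.pop?_last m c
      have hlen : (a :: (m ++ [c])).length = m.length + 2 := by simp
      simp only [pyLoopA, hlen, h0, h1]
      rw [if_pos (by omega), if_pos (by omega)]
      have hm : m.length ≤ f := by
        have := hl; rw [hmc] at this; simp at this; omega
      rw [ih m hm (acc ++ [a + c])]
      rw [show a :: (m ++ [c]) = a :: m ++ [c] by simp, roundB_cons]
      simp

theorem go_eq : ∀ (f : Nat) (l : List Int), 2 ≤ l.length → aGo f l = bGo f l := by
  intro f
  induction f with
  | zero => intro l _; rfl
  | succ f ih =>
    intro l hl
    simp only [aGo, bGo]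
    by_cases h : l.length = 2
    · rw [if_pos h, if_neg (by omega)]
    · rw [if_neg h, if_pos (by omega), loopA_eq l.length l le_rfl []]
      simp only [List.nil_append]
      exact ih (roundB l) (by rw [roundB_length]; omega)

-- ===== VERDICT (by name: the statement is the Claim_ definition above) =====
theorem add_numbers_from_list_spec : Claim_equal_add_numbers_from_list := by
  intro l _ hp
  unfold Spec_add_numbers_from_list add_numbers_from_list add_numbers_from_list_alt
  exact go_eq l.length l hp
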